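-- pv_equiv track=rewrite | github.com/guffre/ROP-Emporium | fluff/fluff32.py | pext_translate
-- ===== SOURCE A (Python) =====
-- def pext_translate(char, mask=0xb0bababa):
--     mask = "{0:032b}".format(mask)
--     char = "{0:08b}".format(ord(char)).ljust(32,".")
--     ret = ""
--     index = 0
--     for m in mask:
--         if m == char[index]:
--             index += 1
--             ret += "1"
--         else:
--             ret += "0"
--     return int(ret,2)
-- ===== SOURCE B (Python) =====
-- def pext_translate(char, mask=0xb0bababa):
--     # find-based: locate each char bit in the mask string with str.find instead of
--     # scanning all mask cells with a running pointer; sum the matched bit weights.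
--     m = "{0:032b}".format(mask)
--     L = len(m)
--     result = 0
--     pos = -1
--     for d in "{0:08b}".format(ord(char)):
--         pos = m.find(d, pos + 1)
--         if pos == -1:
--             break
--         result += 1 << (L - 1 - pos)
--     return result
-- ===== Notes on version B (the rewrite author's own statement) =====
-- stated objective: alternative
-- what changed: Instead of scanning all 32 mask cells while advancing a pointer into the char's bit string and assembling a '0'/'1' string for int(.,2), B iterates over the char's 8 bit digits, locates each with str.find(d, pos+1) on the mask string, and sums the matched bit weights 1<<(L-1-pos) directly, breaking at the first failed find.
import Mathlib
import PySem

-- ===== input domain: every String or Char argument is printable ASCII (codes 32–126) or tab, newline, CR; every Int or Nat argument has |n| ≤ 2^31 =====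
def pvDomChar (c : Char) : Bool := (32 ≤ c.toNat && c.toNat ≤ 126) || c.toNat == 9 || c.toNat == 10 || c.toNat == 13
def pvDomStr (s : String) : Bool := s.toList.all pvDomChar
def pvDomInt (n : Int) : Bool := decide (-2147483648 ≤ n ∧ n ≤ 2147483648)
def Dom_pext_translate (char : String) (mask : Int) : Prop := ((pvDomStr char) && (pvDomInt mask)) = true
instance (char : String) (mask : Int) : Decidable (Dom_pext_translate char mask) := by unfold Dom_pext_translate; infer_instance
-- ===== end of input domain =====

-- B replaces A's 32-step mask scan with a running pointer by str.find-based location of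
-- each char bit, summing the matched bit weights directly (objective: alternative).

-- ===== PORT A =====
-- binary digits of n (no leading zeros; [] for 0)
def pvBinAux (n : Nat) : List Char :=
  if h : n = 0 then [] else pvBinAux (n / 2) ++ [if n % 2 = 1 then '1' else '0']
decreasing_by exact Nat.div_lt_self (Nat.pos_of_ne_zero h) (by norm_num)

-- Python bin digits: "0" for 0
def pvBin (n : Nat) : List Char := if n = 0 then ['0'] else pvBinAux n

-- zero-pad on the left to width w (as in "{0:0wb}")
def pvLeftPad (w : Nat) (cs : List Char) : List Char := List.replicate (w - cs.length) '0' ++ cs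

-- "{0:032b}".format(mask): for negatives the sign counts toward the width
def pvMaskStr (mask : Int) : List Char :=
  if mask < 0 then '-' :: pvLeftPad 31 (pvBin (-mask).toNat) else pvLeftPad 32 (pvBin mask.toNat)

-- A's loop over the mask with running index into the char string.
-- getD: under Pre_ (one printable-ASCII char) index stays < 32, so the default is never read
-- (Python would raise IndexError out of range).
def pvALoop (cs : List Char) : List Char → Nat → List Char
  | [], _ => []
  | m :: ms, index =>
      if m = cs.getD index '.' then '1' :: pvALoop cs ms (index + 1)
      else '0' :: pvALoop cs ms index

-- int(ret, 2) over a string of '0'/'1'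
def pvIntOfBits : Int → List Char → Int
  | a, [] => a
  | a, b :: bs => pvIntOfBits (a * 2 + (if b = '1' then 1 else 0)) bs

def pext_translate (char : String) (mask : Int) : Int :=
  match char.toList with
  | [c] =>
      let ms := pvMaskStr mask
      let digits := pvLeftPad 8 (pvBin c.toNat)
      let cs := digits ++ List.replicate (32 - digits.length) '.'  -- .ljust(32, ".")
      pvIntOfBits 0 (pvALoop cs ms 0)
  | _ => 0  -- Python: ord(char) raises TypeError; excluded by Pre_

-- ===== PORT B =====
-- B-side copies of the formatting helpers (Source B computes the same format strings itself)
def pvBBinAux (n : Nat) : List Char :=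
  if h : n = 0 then [] else pvBBinAux (n / 2) ++ [if n % 2 = 1 then '1' else '0']
decreasing_by exact Nat.div_lt_self (Nat.pos_of_ne_zero h) (by norm_num)

def pvBBin (n : Nat) : List Char := if n = 0 then ['0'] else pvBBinAux n

def pvBLeftPad (w : Nat) (cs : List Char) : List Char := List.replicate (w - cs.length) '0' ++ cs

def pvBMaskStr (mask : Int) : List Char :=
  if mask < 0 then '-' :: pvBLeftPad 31 (pvBBin (-mask).toNat) else pvBLeftPad 32 (pvBBin mask.toNat)

-- str.find scanning from index i (returns -1 if absent)
def pvFindAux (d : Char) : List Char → Nat → Int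
  | [], _ => -1
  | c :: cs, i => if c = d then (i : Int) else pvFindAux d cs (i + 1)

-- m.find(d, start)
def pvFind (cs : List Char) (d : Char) (start : Nat) : Int := pvFindAux d (cs.drop start) start

def pvBLoop (ms : List Char) (L : Nat) : List Char → Int → Int → Int
  | [], _, result => result
  | d :: ds, pos, result =>
      let p := pvFind ms d (pos + 1).toNat
      if p = -1 then result
      else pvBLoop ms L ds p (result + 2 ^ (L - 1 - p.toNat))

def pext_translate_alt (char : String) (mask : Int) : Int :=
  match char.toList with
  | [] => 0  -- Python: ord(char) raises TypeError; excluded by Pre_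
  | c :: rest =>
      if rest.isEmpty then
        let ms := pvBMaskStr mask
        pvBLoop ms ms.length (pvBLeftPad 8 (pvBBin c.toNat)) (-1) 0
      else 0  -- ord raises TypeError; excluded by Pre_

-- ===== PRECONDITION & SPEC =====
-- ord(char) raises TypeError unless char is a single character.
def Pre_pext_translate (char : String) (mask : Int) : Prop := char.length = 1
instance (char : String) (mask : Int) : Decidable (Pre_pext_translate char mask) := by
  unfold Pre_pext_translate; infer_instance

def pvWitness_pext_translate : String × Int := ("a", 5)

def Spec_pext_translate (char : String) (mask : Int) (out : Int) : Prop := out = pext_translate_alt char mask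
instance (char : String) (mask : Int) (out : Int) : Decidable (Spec_pext_translate char mask out) := by unfold Spec_pext_translate; infer_instance

-- ===== CLAIM (what is proved, stated in full; the proofs are below) =====
def Claim_equal_pext_translate : Prop := ∀ (char : String) (mask : Int), Dom_pext_translate char mask → Pre_pext_translate char mask → Spec_pext_translate char mask (pext_translate char mask)

-- ===== LEMMAS AND PROOFS =====

-- Common spec: greedy subsequence-match value, mask suffix against remaining char digits;
-- a match at the head of a mask suffix of length (len ms)+1 contributes weight 2^(len ms).
def pvMval : List Char → List Char → Int
  | [], _ => 0
  | _ :: ms, [] => pvMval ms []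
  | m :: ms, d :: ds => if m = d then 2 ^ ms.length + pvMval ms ds else pvMval ms (d :: ds)

theorem pvMval_nil : ∀ ms : List Char, pvMval ms [] = 0
  | [] => rfl
  | _ :: ms => pvMval_nil ms

theorem pvBBinAux_eq : ∀ n : Nat, pvBBinAux n = pvBinAux n := by
  intro n
  induction n using Nat.strong_induction_on with
  | _ n ih =>
    rw [pvBBinAux, pvBinAux]
    split
    · rfl
    · rename_i h
      rw [ih (n / 2) (Nat.div_lt_self (Nat.pos_of_ne_zero h) (by norm_num))]

theorem pvBBin_eq (n : Nat) : pvBBin n = pvBin n := by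
  unfold pvBBin pvBin; rw [pvBBinAux_eq]

theorem pvBLeftPad_eq (w : Nat) (cs : List Char) : pvBLeftPad w cs = pvLeftPad w cs := rfl

theorem pvBMaskStr_eq (mask : Int) : pvBMaskStr mask = pvMaskStr mask := by
  unfold pvBMaskStr pvMaskStr
  rw [pvBLeftPad_eq, pvBLeftPad_eq, pvBBin_eq, pvBBin_eq]

theorem pvALoop_congr (cs ds : List Char) (h : ∀ j, cs.getD j '.' = ds.getD j '.') :
    ∀ (ms : List Char) (i : Nat), pvALoop cs ms i = pvALoop ds ms i
  | [], _ => rfl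
  | m :: ms, i => by
    simp only [pvALoop, h i]
    by_cases hm : m = ds.getD i '.' <;>
      simp [hm, pvALoop_congr cs ds h ms (i + 1), pvALoop_congr cs ds h ms i]

theorem getD_append_replicate (ds : List Char) (k : Nat) :
    ∀ j, (ds ++ List.replicate k '.').getD j '.' = ds.getD j '.' := by
  induction ds with
  | nil =>
    intro j
    simp only [List.nil_append, List.getD, List.getElem?_replicate]
    split <;> simp
  | cons d ds ih =>
    intro j
    cases j with
    | zero => rfl
    | succ j => simpa [List.getD_cons_succ] using ih j

theorem pvALoop_val (ds : List Char) :
    ∀ (ms : List Char), '.' ∉ ms → ∀ (i : Nat) (a : Int),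
      pvIntOfBits a (pvALoop ds ms i) = a * 2 ^ ms.length + pvMval ms (ds.drop i) := by
  intro ms
  induction ms with
  | nil => intro _ i a; simp [pvALoop, pvIntOfBits, pvMval]
  | cons m ms ih =>
    intro hdot i a
    have hm : m ≠ '.' := fun h => hdot (h ▸ List.mem_cons_self)
    have hms : '.' ∉ ms := fun h => hdot (List.mem_cons_of_mem _ h)
    rcases hdrop : ds.drop i with _ | ⟨d, rest⟩
    · have hlen : ds.length ≤ i := List.drop_eq_nil_iff.mp hdrop
      have hget : ds.getD i '.' = '.' := List.getD_eq_default _ _ hlen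
      simp only [pvALoop, hget, if_neg hm]
      rw [show pvIntOfBits a ('0' :: pvALoop ds ms i) =
            pvIntOfBits (a * 2 + 0) (pvALoop ds ms i) by rfl]
      rw [ih hms i (a * 2 + 0), hdrop]
      simp only [pvMval, pvMval_nil, List.length_cons]
      ring
    · have hget : ds.getD i '.' = d := by
        have : ds[i]? = some d := by rw [← List.head?_drop, hdrop]; rfl
        simp [List.getD, this]
      have hdrop1 : ds.drop (i + 1) = rest := by
        rw [← List.tail_drop, hdrop]; rfl
      by_cases hmd : m = d
      · simp only [pvALoop, hget, if_pos hmd]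
        rw [show pvIntOfBits a ('1' :: pvALoop ds ms (i + 1)) =
              pvIntOfBits (a * 2 + 1) (pvALoop ds ms (i + 1)) by rfl]
        rw [ih hms (i + 1) (a * 2 + 1), hdrop1]
        simp only [pvMval, if_pos hmd, List.length_cons]
        ring
      · simp only [pvALoop, hget, if_neg hmd]
        rw [show pvIntOfBits a ('0' :: pvALoop ds ms i) =
              pvIntOfBits (a * 2 + 0) (pvALoop ds ms i) by rfl]
        rw [ih hms i (a * 2 + 0), hdrop]
        simp only [pvMval, if_neg hmd, List.length_cons]
        ring

theorem pvFind_neg (d : Char) :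
    ∀ (t : List Char) (i : Nat), pvFindAux d t i = -1 →
      ∀ ds, pvMval t (d :: ds) = 0 := by
  intro t
  induction t with
  | nil => intro _ _ _; rfl
  | cons c t ih =>
    intro i h ds
    by_cases hc : c = d
    · simp only [pvFindAux, if_pos hc] at h; omega
    · simp only [pvFindAux, if_neg hc] at h
      simpa [pvMval, hc] using ih (i + 1) h ds

theorem pvFind_pos (d : Char) :
    ∀ (t : List Char) (i : Nat), pvFindAux d t i ≠ -1 →
      ∃ n : Nat, pvFindAux d t i = ((i + n : Nat) : Int) ∧ n < t.length ∧
        ∀ ds, pvMval t (d :: ds) = 2 ^ (t.length - 1 - n) + pvMval (t.drop (n + 1)) ds := by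
  intro t
  induction t with
  | nil => intro i h; exact absurd rfl h
  | cons c t ih =>
    intro i h
    by_cases hc : c = d
    · refine ⟨0, ?_, by simp, ?_⟩
      · simp [pvFindAux, hc]
      · intro ds; simp [pvMval, hc]
    · simp only [pvFindAux, if_neg hc] at h ⊢
      obtain ⟨n, hval, hlt, hmv⟩ := ih (i + 1) h
      refine ⟨n + 1, ?_, by simpa using Nat.succ_lt_succ hlt, ?_⟩
      · rw [hval]; push_cast; ring
      · intro ds
        rw [show pvMval (c :: t) (d :: ds) = pvMval t (d :: ds) by simp [pvMval, hc]]
        rw [hmv ds]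
        have he : t.length - 1 - n = (c :: t).length - 1 - (n + 1) := by
          simp only [List.length_cons]; omega
        rw [he]
        rfl

theorem pvBLoop_val (ms : List Char) :
    ∀ (ds : List Char) (s : Nat) (r : Int), s ≤ ms.length →
      pvBLoop ms ms.length ds ((s : Int) - 1) r = r + pvMval (ms.drop s) ds := by
  intro ds
  induction ds with
  | nil => intro s r _; simp [pvBLoop, pvMval_nil]
  | cons d ds ih =>
    intro s r hs
    have hstart : (((s : Int) - 1) + 1).toNat = s := by omega
    simp only [pvBLoop, pvFind, hstart]
    by_cases hfind : pvFindAux d (ms.drop s) s = -1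
    · rw [if_pos hfind, pvFind_neg d (ms.drop s) s hfind ds]
      ring
    · obtain ⟨n, hval, hlt, hmv⟩ := pvFind_pos d (ms.drop s) s hfind
      rw [hval]
      have hlen : (ms.drop s).length = ms.length - s := List.length_drop
      have hq : s + n < ms.length := by omega
      have hne : ((s + n : Nat) : Int) ≠ -1 := by omega
      rw [if_neg hne]
      have htonat : ((s + n : Nat) : Int).toNat = s + n := by omega
      have hrec : pvBLoop ms ms.length ds ((s + n : Nat) : Int)
            (r + 2 ^ (ms.length - 1 - ((s + n : Nat) : Int).toNat)) =
          r + 2 ^ (ms.length - 1 - (s + n)) + pvMval (ms.drop (s + n + 1)) ds := by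
        have := ih (s + n + 1) (r + 2 ^ (ms.length - 1 - ((s + n : Nat) : Int).toNat)) (by omega)
        rw [htonat] at this ⊢
        rw [show ((s + n + 1 : Nat) : Int) - 1 = ((s + n : Nat) : Int) by push_cast; ring] at this
        exact this
      rw [hrec, hmv ds]
      have he : (ms.drop s).length - 1 - n = ms.length - 1 - (s + n) := by omega
      have hd : (ms.drop s).drop (n + 1) = ms.drop (s + n + 1) := by
        rw [List.drop_drop, Nat.add_assoc]
      rw [he, hd]
      ring

theorem pvBinAux_mem : ∀ (n : Nat) (c : Char), c ∈ pvBinAux n → c = '0' ∨ c = '1' := by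
  intro n
  induction n using Nat.strong_induction_on with
  | _ n ih =>
    intro c hc
    rw [pvBinAux] at hc
    split at hc
    · simp at hc
    · rename_i h
      rcases List.mem_append.mp hc with h1 | h1
      · exact ih (n / 2) (Nat.div_lt_self (Nat.pos_of_ne_zero h) (by norm_num)) c h1
      · simp only [List.mem_singleton] at h1
        subst h1
        split <;> simp

theorem dot_not_mem_maskStr (mask : Int) : '.' ∉ pvMaskStr mask := by
  have hbin : ∀ m : Nat, '.' ∉ pvBin m := by
    intro m hc
    unfold pvBin at hc
    split at hc
    · simp at hc
    · rcases pvBinAux_mem m '.' hc with h | h <;> simp at h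
  have hpad : ∀ (w m : Nat), '.' ∉ pvLeftPad w (pvBin m) := by
    intro w m hc
    rcases List.mem_append.mp hc with h | h
    · exact absurd (List.eq_of_mem_replicate h) (by decide)
    · exact hbin m h
  unfold pvMaskStr
  split
  · intro hc
    rcases List.mem_cons.mp hc with h | h
    · simp at h
    · exact hpad 31 (-mask).toNat h
  · exact hpad 32 mask.toNat

-- ===== VERDICT (by name: the statement is the Claim_ definition above) =====
theorem pext_translate_spec : Claim_equal_pext_translate := by
  intro char mask _ hpre
  unfold Spec_pext_translate
  unfold Pre_pext_translate at hpre
  have hlen : char.toList.length = 1 := by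
    rw [String.length_toList]; exact hpre
  obtain ⟨c, hc⟩ : ∃ c, char.toList = [c] := by
    rcases hl : char.toList with _ | ⟨c, _ | ⟨d, t⟩⟩ <;> simp [hl] at hlen ⊢
  unfold pext_translate pext_translate_alt
  rw [hc]
  simp only [pvBMaskStr_eq, pvBLeftPad_eq, pvBBin_eq, List.isEmpty_nil, if_pos]
  set ms := pvMaskStr mask with hms
  set digits := pvLeftPad 8 (pvBin c.toNat) with hdigits
  have h1 : pvALoop (digits ++ List.replicate (32 - digits.length) '.') ms 0 =
      pvALoop digits ms 0 :=
    pvALoop_congr _ _ (getD_append_replicate digits _) ms 0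
  rw [h1, pvALoop_val digits ms (dot_not_mem_maskStr mask) 0 0]
  have h2 : pvBLoop ms ms.length digits (-1) 0 = pvMval ms digits := by
    have := pvBLoop_val ms digits 0 0 (Nat.zero_le _)
    norm_num at this
    exact this
  rw [h2]
  simp only [List.drop_zero]
  ring
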